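-- pv_equiv track=rewrite | github.com/braedongipson/CE | planeSeats.py | reserve
-- ===== SOURCE A (Python) =====
-- DEFAULT = 10 #max amount of 4 person families that could fit on the plane with no reservations
--
-- NUM_ROWS = 5
--
-- LEFT_SECTION_START = 1
--
-- LEFT_SECTION_END = 3
--
-- PLANE_MIDDLE = 5
--
-- RIGHT_SECTION_START = 7
--
-- RIGHT_SECTION_END = 9
--
-- colLetters = ['A', 'B', 'C', 'D', 'E', 'F', 'G', 'H', 'J', 'K'] #The Letters representing the columns in the plane seating
--
-- def reserve(input):
--     ''' Takes a string containing the seats that are reserved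
--     Uses MaxFamilies() method to return the maximum number of 4 person families that can be seated on the plane with the given reservations
--     if the string is empty returns 10
--
--     Parameters
--     ----------
--     input : str, required
--         The seats in format '1A 2B 3D' that are reserved
--     output: int
--         number of 4 person families that can be seated
--     '''
--     if input == "":
--         return DEFAULT
--     input =  processString(input)
--
--     taken_seats = []
--     for i in range(0, len(input)-1, 2):
--         taken_seats.append(''.join(input[i:i+2]))
--     seats = {}
--
--     for i in range (1, NUM_ROWS+1):
--         seats[i] = {}
--         for c in colLetters:
--             if str(i) + c in taken_seats:
--                 seats[i][c] = 'x'
--             else: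
--                 seats[i][c] = ' '
--
--     return maxFamilies(seats)
--
-- def processString(str):
--     '''takes string of reserved seats on plane
--         returns a list of the seats (str) without white space
--     Parameters
--     ----------
--     input : str
--     output : list(str)
--     '''
--     str = list(str)
--     ret = []
--     for item in str:
--         if item != ' ':
--             ret.append(item)
--     return ret
--
-- def maxFamilies(seats):
--     ''' takes 2 dimensional dictionary of seating arrangements
--         Returns the maximum number of 4 person families that can be seated
--     Parameters
--     ----------
--     input : dict{dict{int: str}} required
--         the seats their codes '1A' and whether or not they are reserved: (reserved == 'x', available == ' ')
--     output: int
--         number of 4 person families that can be seated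
--     Time complexity: O(s*m) where s is the number of columns in a section being checked and m is the number of rows
--     Space complexity: O(n * m)
--     '''
--     num_families = 0
--     for i in range(1, NUM_ROWS+1):
--         #check middle section D E F G
--         middle_section = [str(seats[i][colLetters[n]]) for n in range(LEFT_SECTION_END, RIGHT_SECTION_START)]
--         middle_section = ''.join(middle_section)
--
--         if('x' in middle_section): #a middle seat is reserved
--             if ('x' in ''.join([str(seats[i][colLetters[n]]) for n in range(PLANE_MIDDLE, RIGHT_SECTION_START)])): #if F or G are reserved check for B C D E
--                 left = ''.join([str(seats[i][colLetters[n]]) for n in range(LEFT_SECTION_START, PLANE_MIDDLE)])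
--                 if 'x' not in left:
--                     num_families += 1
--                     continue
--             else:  #if D or E are reserved check for F G H J
--                 right = ''.join([str(seats[i][colLetters[n]]) for n in range(PLANE_MIDDLE, RIGHT_SECTION_END)])
--                 if 'x' not in right:
--                     num_families += 1
--                     continue
--         else: #if middle section is clear check B C and H J
--             left = ''.join([str(seats[i][colLetters[n]]) for n in range(LEFT_SECTION_START, LEFT_SECTION_END)])
--             right = ''.join([str(seats[i][colLetters[n]]) for n in range(RIGHT_SECTION_START, RIGHT_SECTION_END)])
--             if ( 'x' not in left and 'x' not in right): #If if both are clear... +2 families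
--                 num_families += 2
--             else:
--                 num_families += 1 #if one or neither are clear + 1 families
--     return num_families
-- ===== SOURCE B (Python) =====
-- def reserve(input):
--     ''' Same contract as A: count the max number of 4-person families seatable
--     given reserved seats; empty string returns 10.
--     B keeps A's parsing (drop spaces, pair consecutive chars into seat codes)
--     but replaces the filled row/column grid dict with a set of reserved codes,
--     and computes each row's contribution from three free-block flags. '''
--     if input == "":
--         return 10
--     chars = [c for c in input if c != ' ']
--     taken = {''.join(chars[i:i + 2]) for i in range(0, len(chars) - 1, 2)}
--     total = 0
--     for i in range(1, 6):
--         r = str(i)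
--         left = all(r + c not in taken for c in ['B', 'C', 'D', 'E'])
--         mid = all(r + c not in taken for c in ['D', 'E', 'F', 'G'])
--         right = all(r + c not in taken for c in ['F', 'G', 'H', 'J'])
--         total += 2 if (left and right) else (1 if (left or mid or right) else 0)
--     return total
-- ===== Notes on version B (the rewrite author's own statement) =====
-- stated objective: simpler
-- what changed: Replaces A's filled 5x10 row/column grid dict and its nested branch-and-scan over column sections with a set of reserved seat codes and, per row, three free-block membership flags combined by one arithmetic formula (2 if left and right blocks free, else 1 if any block free, else 0); no grid is built or rescanned.
import Mathlib
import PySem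

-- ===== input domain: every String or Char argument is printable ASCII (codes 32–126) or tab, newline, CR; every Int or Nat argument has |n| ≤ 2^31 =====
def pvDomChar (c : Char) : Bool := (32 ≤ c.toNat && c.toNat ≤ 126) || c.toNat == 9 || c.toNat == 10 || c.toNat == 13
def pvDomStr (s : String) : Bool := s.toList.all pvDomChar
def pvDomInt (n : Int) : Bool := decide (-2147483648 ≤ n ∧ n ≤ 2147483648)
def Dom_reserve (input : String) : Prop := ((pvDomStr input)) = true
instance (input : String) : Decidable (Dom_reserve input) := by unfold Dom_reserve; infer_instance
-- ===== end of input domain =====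

-- B replaces A's filled 5x10 grid dict with a set of reserved seat codes and a
-- per-row free-block-flag formula (simpler decomposition; same parsing).
-- Seat codes ('1A' etc.) are represented as List Char throughout (String equality in
-- Python is equality of the character lists, so this is exact).

-- ===== PORT A =====
def colLetters : List Char := ['A', 'B', 'C', 'D', 'E', 'F', 'G', 'H', 'J', 'K']

-- processString: drop spaces, keep the characters in order
def processString (s : List Char) : List Char :=
  s.foldl (fun ret item => if item ≠ ' ' then ret ++ [item] else ret) []

-- taken_seats: for i in range(0, len(input)-1, 2): append ''.join(input[i:i+2])
def takenSeats (cs : List Char) : List (List Char) :=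
  (PySem.List.pyRange 0 ((cs.length : Int) - 1) 2).foldl
    (fun ts i => ts ++ [PySem.List.slice cs (some i) (some (i + 2))]) []

-- seats[i][c] = 'x' if str(i)+c in taken_seats else ' '
-- seats[i] = {}; for c in colLetters: seats[i][c] = 'x'/' '  (one row of the grid)
def rowFold (taken : List (List Char)) (i : Int) : PySem.Dict Char Char :=
  colLetters.foldl
    (fun row c => row.insert c
      (if taken.contains (PySem.Int.toChars i ++ [c]) then 'x' else ' '))
    PySem.Dict.empty

def reserveSeats (taken : List (List Char)) : PySem.Dict Int (PySem.Dict Char Char) :=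
  (PySem.List.pyRange 1 6 1).foldl (fun seats i => seats.insert i (rowFold taken i)) PySem.Dict.empty

-- ''.join([str(seats[i][colLetters[n]]) for n in range(a, b)])  (indices always in
-- range and keys always present in A, so the defaults below are never used)
def sectionChars (row : PySem.Dict Char Char) (a b : Int) : List Char :=
  (PySem.List.pyRange a b 1).map
    (fun n => row.getD (PySem.List.pyGetD colLetters n ' ') ' ')

-- one iteration of the maxFamilies loop ('continue' = fall to the end of the body)
def rowStep (seats : PySem.Dict Int (PySem.Dict Char Char)) (num : Int) (i : Int) : Int :=
  let row := seats.getD i PySem.Dict.empty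
  let middle := sectionChars row 3 7
  if middle.contains 'x' then
    if (sectionChars row 5 7).contains 'x' then
      if !(sectionChars row 1 5).contains 'x' then num + 1 else num
    else
      if !(sectionChars row 5 9).contains 'x' then num + 1 else num
  else
    if !(sectionChars row 1 3).contains 'x' && !(sectionChars row 7 9).contains 'x'
    then num + 2 else num + 1

def maxFamilies (seats : PySem.Dict Int (PySem.Dict Char Char)) : Int :=
  (PySem.List.pyRange 1 6 1).foldl (rowStep seats) 0

def reserve (input : String) : Int :=
  if input = "" then 10
  else
    let cs := processString input.toList
    maxFamilies (reserveSeats (takenSeats cs))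

-- ===== PORT B =====
def altFree (taken : PySem.Set (List Char)) (i : Int) (cols : List Char) : Bool :=
  cols.all (fun c => !(PySem.Set.contains taken (PySem.Int.toChars i ++ [c])))

def reserve_alt (input : String) : Int :=
  if input = "" then 10
  else
    let chars := input.toList.filter (fun c => c ≠ ' ')
    let taken : PySem.Set (List Char) := PySem.Set.ofList
      ((PySem.List.pyRange 0 ((chars.length : Int) - 1) 2).map
        (fun i => PySem.List.slice chars (some i) (some (i + 2))))
    (PySem.List.pyRange 1 6 1).foldl
      (fun total i =>
        let left := altFree taken i ['B', 'C', 'D', 'E']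
        let mid := altFree taken i ['D', 'E', 'F', 'G']
        let right := altFree taken i ['F', 'G', 'H', 'J']
        total + (if left && right then 2 else if left || mid || right then 1 else 0))
      0

-- ===== PRECONDITION & SPEC =====
def Spec_reserve (input : String) (out : Int) : Prop := out = reserve_alt input
instance (input : String) (out : Int) : Decidable (Spec_reserve input out) := by unfold Spec_reserve; infer_instance

-- ===== CLAIM (what is proved, stated in full; the proofs are below) =====
def Claim_equal_reserve : Prop := ∀ (input : String), Dom_reserve input → Spec_reserve input (reserve input)

-- ===== LEMMAS AND PROOFS =====

-- abbreviations for the proof: "seat str(i)+c is taken", "reserved marker char"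
def tk (t : List (List Char)) (i : Int) (c : Char) : Bool :=
  t.contains (PySem.Int.toChars i ++ [c])

def xc (b : Bool) : Char := if b then 'x' else ' '

-- the row dict A builds, written as a literal association list
def rowMk (t : List (List Char)) (i : Int) : PySem.Dict Char Char :=
  PySem.Dict.mk (colLetters.map (fun c => (c, if t.contains (PySem.Int.toChars i ++ [c]) then 'x' else ' ')))

-- A's per-row contribution as a function of the eight relevant booleans
def contribA (b c d e f g h j : Bool) : Int :=
  if ([xc d, xc e, xc f, xc g] : List Char).contains 'x' then
    if ([xc f, xc g] : List Char).contains 'x' then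
      if !([xc b, xc c, xc d, xc e] : List Char).contains 'x' then 1 else 0
    else
      if !([xc f, xc g, xc h, xc j] : List Char).contains 'x' then 1 else 0
  else
    if !([xc b, xc c] : List Char).contains 'x' && !([xc h, xc j] : List Char).contains 'x'
    then 2 else 1

-- B's per-row contribution as a function of the same booleans
def contribB (b c d e f g h j : Bool) : Int :=
  let left := !b && (!c && (!d && (!e && true)))
  let mid := !d && (!e && (!f && (!g && true)))
  let right := !f && (!g && (!h && (!j && true)))
  if left && right then 2 else if left || mid || right then 1 else 0

lemma contrib_eq (b c d e f g h j : Bool) :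
    contribA b c d e f g h j = contribB b c d e f g h j := by
  revert b c d e f g h j; decide

lemma rowFold_eq (t : List (List Char)) (i : Int) : rowFold t i = rowMk t i := by
  apply PySem.Dict.ext
  have h := PySem.Dict.items_foldl_insert_fresh (d := PySem.Dict.empty)
    (l := colLetters) (k := fun c => c)
    (v := fun c => if t.contains (PySem.Int.toChars i ++ [c]) then 'x' else ' ')
    (by simp [pysem]) (by decide)
  beta_reduce at h
  simpa [rowFold, rowMk] using h

lemma seats_eq (t : List (List Char)) :
    reserveSeats t = PySem.Dict.mk (([1,2,3,4,5] : List Int).map (fun i => (i, rowMk t i))) := by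
  unfold reserveSeats
  rw [show PySem.List.pyRange 1 6 1 = ([1,2,3,4,5] : List Int) from rfl]
  simp only [rowFold_eq]
  apply PySem.Dict.ext
  have h := PySem.Dict.items_foldl_insert_fresh (d := PySem.Dict.empty)
    (l := ([1,2,3,4,5] : List Int)) (k := fun i => i) (v := fun i => rowMk t i)
    (by simp [pysem]) (by decide)
  beta_reduce at h
  rw [h]
  rfl

lemma sec37 (t : List (List Char)) (i : Int) :
    sectionChars (rowMk t i) 3 7 = [xc (tk t i 'D'), xc (tk t i 'E'), xc (tk t i 'F'), xc (tk t i 'G')] := rfl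
lemma sec57 (t : List (List Char)) (i : Int) :
    sectionChars (rowMk t i) 5 7 = [xc (tk t i 'F'), xc (tk t i 'G')] := rfl
lemma sec15 (t : List (List Char)) (i : Int) :
    sectionChars (rowMk t i) 1 5 = [xc (tk t i 'B'), xc (tk t i 'C'), xc (tk t i 'D'), xc (tk t i 'E')] := rfl
lemma sec59 (t : List (List Char)) (i : Int) :
    sectionChars (rowMk t i) 5 9 = [xc (tk t i 'F'), xc (tk t i 'G'), xc (tk t i 'H'), xc (tk t i 'J')] := rfl
lemma sec13 (t : List (List Char)) (i : Int) :
    sectionChars (rowMk t i) 1 3 = [xc (tk t i 'B'), xc (tk t i 'C')] := rfl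
lemma sec79 (t : List (List Char)) (i : Int) :
    sectionChars (rowMk t i) 7 9 = [xc (tk t i 'H'), xc (tk t i 'J')] := rfl

lemma rowStep_eq (t : List (List Char)) (num i : Int) (hi : i ∈ ([1,2,3,4,5] : List Int)) :
    rowStep (reserveSeats t) num i
      = num + contribA (tk t i 'B') (tk t i 'C') (tk t i 'D') (tk t i 'E')
                       (tk t i 'F') (tk t i 'G') (tk t i 'H') (tk t i 'J') := by
  have hrow : (reserveSeats t).getD i PySem.Dict.empty = rowMk t i := by
    rw [seats_eq]; fin_cases hi <;> rfl
  unfold rowStep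
  rw [hrow]
  simp only [sec37, sec57, sec15, sec59, sec13, sec79]
  unfold contribA
  split_ifs <;> omega

lemma containsOfList (t : List (List Char)) (x : List Char) :
    PySem.Set.contains (PySem.Set.ofList t) x = t.contains x := by
  simp [pysem]

lemma altFree_eq (t : List (List Char)) (i : Int) (cols : List Char) :
    altFree (PySem.Set.ofList t) i cols = cols.all (fun c => !(tk t i c)) := by
  unfold altFree tk
  simp only [containsOfList]

lemma main_eq (t : List (List Char)) :
    maxFamilies (reserveSeats t)
      = (PySem.List.pyRange 1 6 1).foldl
          (fun total i =>
            let left := altFree (PySem.Set.ofList t) i ['B', 'C', 'D', 'E']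
            let mid := altFree (PySem.Set.ofList t) i ['D', 'E', 'F', 'G']
            let right := altFree (PySem.Set.ofList t) i ['F', 'G', 'H', 'J']
            total + (if left && right then 2 else if left || mid || right then 1 else 0))
          0 := by
  unfold maxFamilies
  rw [show PySem.List.pyRange 1 6 1 = ([1,2,3,4,5] : List Int) from rfl]
  have h1 := PySem.List.foldl_congr_mem (l := ([1,2,3,4,5] : List Int)) (init := (0 : Int))
    (f := rowStep (reserveSeats t))
    (g := fun num i =>
        num + contribB (tk t i 'B') (tk t i 'C') (tk t i 'D') (tk t i 'E')
                       (tk t i 'F') (tk t i 'G') (tk t i 'H') (tk t i 'J'))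
    (fun acc x hx => by rw [rowStep_eq t acc x hx, contrib_eq])
  have h2 := PySem.List.foldl_congr_mem (l := ([1,2,3,4,5] : List Int)) (init := (0 : Int))
    (f := fun total i =>
        let left := altFree (PySem.Set.ofList t) i ['B', 'C', 'D', 'E']
        let mid := altFree (PySem.Set.ofList t) i ['D', 'E', 'F', 'G']
        let right := altFree (PySem.Set.ofList t) i ['F', 'G', 'H', 'J']
        total + (if left && right then 2 else if left || mid || right then 1 else 0))
    (g := fun num i =>
        num + contribB (tk t i 'B') (tk t i 'C') (tk t i 'D') (tk t i 'E')
                       (tk t i 'F') (tk t i 'G') (tk t i 'H') (tk t i 'J'))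
    (fun acc x hx => by
      simp only [altFree_eq, List.all_cons, List.all_nil, contribB])
  exact h1.trans h2.symm

-- ===== VERDICT (by name: the statement is the Claim_ definition above) =====
theorem reserve_spec : Claim_equal_reserve := by
  intro input _
  unfold Spec_reserve reserve reserve_alt
  by_cases h : input = ""
  · simp [h]
  · simp only [if_neg h]
    have hps : processString input.toList = input.toList.filter (fun c => decide (c ≠ ' ')) := by
      unfold processString
      rw [PySem.List.foldl_append_ite_eq_filter]
      simp
    rw [hps]
    have htaken : takenSeats (input.toList.filter (fun c => decide (c ≠ ' ')))
        = (PySem.List.pyRange 0 (((input.toList.filter (fun c => decide (c ≠ ' '))).length : Int) - 1) 2).map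
            (fun i => PySem.List.slice (input.toList.filter (fun c => decide (c ≠ ' '))) (some i) (some (i + 2))) := by
      unfold takenSeats
      rw [PySem.List.foldl_append_singleton_eq_map]
      simp
    rw [htaken]
    exact main_eq _
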